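-- pv_equiv track=rewrite | github.com/MilaCheban/Dict_func | func_dict_1/code_py.py | count_pre_words
-- ===== SOURCE A (Python) =====
-- def count_pre_words(input_line):
--   words = input_line.split()
--   counts = {}
--   result = []
--
--   for el in words:
--     result.append(counts.get(el, 0))
--     counts[el] = counts.get(el, 0) + 1
--
--   return result
-- ===== SOURCE B (Python) =====
-- def count_pre_words(input_line):
--     words = input_line.split()
--     return [words[:i].count(w) for i, w in enumerate(words)]
-- ===== Notes on version B (the rewrite author's own statement) =====
-- stated objective: simpler
-- what changed: Replaces the running dict of counts with a one-line comprehension that rescans the prefix words[:i] for each position.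
import Mathlib
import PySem

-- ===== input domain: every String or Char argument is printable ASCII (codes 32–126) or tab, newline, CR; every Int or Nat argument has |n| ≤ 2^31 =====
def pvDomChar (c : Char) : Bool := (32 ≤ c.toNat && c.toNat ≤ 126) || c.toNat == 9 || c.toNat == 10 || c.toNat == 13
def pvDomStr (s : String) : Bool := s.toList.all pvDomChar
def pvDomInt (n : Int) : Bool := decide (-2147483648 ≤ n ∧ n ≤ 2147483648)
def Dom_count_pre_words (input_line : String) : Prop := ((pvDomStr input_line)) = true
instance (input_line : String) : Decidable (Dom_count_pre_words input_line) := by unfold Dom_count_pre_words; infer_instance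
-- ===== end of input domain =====

-- B replaces A's running dict of counts with a comprehension that rescans the prefix words[:i] for each position (simpler, not faster).

-- ===== PORT A =====
def count_pre_words (input_line : String) : List Int :=
  let words := PySem.Str.split₀ input_line
  (words.foldl
    (fun (st : PySem.Dict String Int × List Int) el =>
      (st.1.insert el (st.1.getD el 0 + 1), st.2 ++ [st.1.getD el 0]))
    (PySem.Dict.empty, [])).2

-- ===== PORT B =====
def count_pre_words_alt (input_line : String) : List Int :=
  let words := PySem.Str.split₀ input_line
  (PySem.List.enumerate words).map
    (fun p => ((PySem.List.slice words none (some p.1)).count p.2 : Int))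

-- ===== PRECONDITION & SPEC =====
def Spec_count_pre_words (input_line : String) (out : List Int) : Prop := out = count_pre_words_alt input_line
instance (input_line : String) (out : List Int) : Decidable (Spec_count_pre_words input_line out) := by unfold Spec_count_pre_words; infer_instance

-- ===== CLAIM (what is proved, stated in full; the proofs are below) =====
def Claim_equal_count_pre_words : Prop := ∀ (input_line : String), Dom_count_pre_words input_line → Spec_count_pre_words input_line (count_pre_words input_line)

-- ===== LEMMAS AND PROOFS =====

theorem cpw_loop_eq (ws : List String) : ∀ (pre : List String) (acc : List Int)
    (d : PySem.Dict String Int), (∀ v, d.getD v 0 = (pre.count v : Int)) →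
    (ws.foldl
      (fun (st : PySem.Dict String Int × List Int) el =>
        (st.1.insert el (st.1.getD el 0 + 1), st.2 ++ [st.1.getD el 0]))
      (d, acc)).2
    = acc ++ (PySem.List.enumerate ws (pre.length : Int)).map
        (fun p => ((PySem.List.slice (pre ++ ws) none (some p.1)).count p.2 : Int)) := by
  induction ws with
  | nil => intro pre acc d _; simp [PySem.List.enumerate_nil]
  | cons w ws ih =>
    intro pre acc d hd
    rw [List.foldl_cons]
    have h1 : ∀ v, (d.insert w (d.getD w 0 + 1)).getD v 0 = ((pre ++ [w]).count v : Int) := by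
      intro v
      have := PySem.Dict.getD_foldl_insert_add_one [w] d v
      simp only [List.foldl_cons, List.foldl_nil] at this
      rw [this, hd v, List.count_append]
      push_cast
      ring
    have ih' := ih (pre ++ [w]) (acc ++ [d.getD w 0]) _ h1
    rw [ih']
    rw [PySem.List.enumerate_cons]
    have hlen : ((pre ++ [w]).length : Int) = (pre.length : Int) + 1 := by
      simp
    rw [hlen]
    have hfull : (pre ++ [w]) ++ ws = pre ++ w :: ws := by simp
    rw [hfull]
    have hhead : ((PySem.List.slice (pre ++ w :: ws) none (some ((pre.length : Int)))).count w : Int)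
        = d.getD w 0 := by
      rw [PySem.List.slice_to_natCast]
      have : (pre ++ w :: ws).take pre.length = pre := by
        simp
      rw [this]; exact (hd w).symm
    simp only [List.map_cons, hhead]
    simp

theorem count_pre_words_eq (input_line : String) :
    count_pre_words input_line = count_pre_words_alt input_line := by
  unfold count_pre_words count_pre_words_alt
  have h := cpw_loop_eq (PySem.Str.split₀ input_line) [] [] PySem.Dict.empty
    (by intro v; simp [PySem.Dict.getD_of_not_contains])
  simpa using h

-- ===== VERDICT (by name: the statement is the Claim_ definition above) =====
theorem count_pre_words_spec : Claim_equal_count_pre_words := by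
  intro s _
  unfold Spec_count_pre_words
  exact count_pre_words_eq s
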